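-- pv_equiv track=rewrite | github.com/mlelarge/graph_neural_net | toolbox/searches.py | find_g_max
-- ===== SOURCE A (Python) =====
-- def find_g_max(gv):
--     assert len(gv)!=0, "No data given"
--     k = 0
--     g_max = gv[0]
--     cur_sum = gv[0]
--     for i,value in enumerate(gv[1:]):
--         cur_sum += value
--         if cur_sum>g_max:
--             k = i+1
--             g_max = cur_sum
--     return k,g_max
-- ===== SOURCE B (Python) =====
-- def find_g_max(gv):
--     assert len(gv) != 0, "No data given"
--     prefix = []
--     s = 0
--     for v in gv:
--         s += v
--         prefix.append(s)
--     g_max = max(prefix)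
--     k = prefix.index(g_max)
--     return k, g_max
-- ===== Notes on version B (the rewrite author's own statement) =====
-- stated objective: simpler
-- what changed: Replaces A's interleaved running-sum-with-conditional-record-update by a table-then-scan decomposition: build the full prefix-sum list, then take max() and its first index via .index().
import Mathlib
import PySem

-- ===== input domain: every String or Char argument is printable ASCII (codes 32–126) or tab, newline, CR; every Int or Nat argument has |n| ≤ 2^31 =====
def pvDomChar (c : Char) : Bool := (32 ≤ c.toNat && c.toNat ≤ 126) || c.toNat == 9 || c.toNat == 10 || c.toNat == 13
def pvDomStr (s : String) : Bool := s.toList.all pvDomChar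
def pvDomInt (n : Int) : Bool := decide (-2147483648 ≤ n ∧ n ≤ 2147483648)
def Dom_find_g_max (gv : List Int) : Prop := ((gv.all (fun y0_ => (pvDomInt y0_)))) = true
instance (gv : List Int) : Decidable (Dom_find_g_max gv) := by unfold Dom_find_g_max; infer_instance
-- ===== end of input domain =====

-- B builds the full prefix-sum table first and then takes max and its first index,
-- replacing A's single interleaved running-sum/record loop (objective: simpler decomposition).


-- ===== PORT A =====
-- loop body of A: state (k, g_max, cur_sum), element (i, value) from enumerate(gv[1:])
def stepA (st : Int × Int × Int) (p : Int × Int) : Int × Int × Int :=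
  let cur_sum := st.2.2 + p.2
  if cur_sum > st.2.1 then (p.1 + 1, cur_sum, cur_sum) else (st.1, st.2.1, cur_sum)

def find_g_max (gv : List Int) : Int × Int :=
  match gv with
  | [] => (0, 0)   -- assert fires in Python; excluded by Pre_find_g_max
  | g0 :: rest =>  -- g0 = gv[0], rest = gv[1:]
    let r := (PySem.List.enumerate rest).foldl stepA (0, g0, g0)
    (r.1, r.2.1)

-- ===== PORT B =====
-- loop body of B: state (prefix, s); 'prefix.append(s)' after 's += v'
def stepB (acc : List Int × Int) (v : Int) : List Int × Int :=
  let s := acc.2 + v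
  (acc.1 ++ [s], s)

def find_g_max_alt (gv : List Int) : Int × Int :=
  let st := gv.foldl stepB ([], 0)
  match PySem.List.max? st.1 (fun y => y) with
  | none => (0, 0)   -- empty list: Python B's assert fires; excluded by Pre_find_g_max
  | some g_max =>
    match PySem.List.index? st.1 g_max with
    | none => (0, 0)  -- unreachable: the max is a member of the list
    | some k => ((k : Int), g_max)

-- ===== PRECONDITION & SPEC =====
-- Python A asserts len(gv) != 0 (AssertionError on []): the empty list is excluded.
def Pre_find_g_max (gv : List Int) : Prop := gv ≠ []
instance (gv : List Int) : Decidable (Pre_find_g_max gv) := by unfold Pre_find_g_max; infer_instance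
def pvWitness_find_g_max : List Int := [1, -2, 3]

def Spec_find_g_max (gv : List Int) (out : Int × Int) : Prop := out = find_g_max_alt gv
instance (gv : List Int) (out : Int × Int) : Decidable (Spec_find_g_max gv out) := by unfold Spec_find_g_max; infer_instance

-- ===== CLAIM (what is proved, stated in full; the proofs are below) =====
def Claim_equal_find_g_max : Prop := ∀ (gv : List Int), Dom_find_g_max gv → Pre_find_g_max gv → Spec_find_g_max gv (find_g_max gv)

-- ===== LEMMAS AND PROOFS =====

/-- Running prefix sums of `t` starting from accumulated sum `s`. -/
def pref (s : Int) : List Int → List Int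
  | [] => []
  | v :: t => (s + v) :: pref (s + v) t

/-- First-strict-record scan: `i` is the index of the next element, `(k, g)` the record so far. -/
def aux (i k g : Int) : List Int → Int × Int
  | [] => (k, g)
  | v :: t => if v > g then aux (i + 1) i v t else aux (i + 1) k g t

/-- Index (as Int) of the first occurrence of `m` in `t` (0 if absent; used only when present). -/
def fidx (t : List Int) (m : Int) : Int := (((PySem.List.index? t m).getD 0 : Nat) : Int)

theorem lemA (t : List Int) (i0 k g cur : Int) :
    (PySem.List.enumerate t i0).foldl stepA (k, g, cur)
      = ((aux (i0 + 1) k g (pref cur t)).1, (aux (i0 + 1) k g (pref cur t)).2, cur + t.sum) := by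
  induction t generalizing i0 k g cur with
  | nil => simp [PySem.List.enumerate_nil, pref, aux]
  | cons v t ih =>
    rw [PySem.List.enumerate_cons, List.foldl_cons]
    rw [show stepA (k, g, cur) (i0, v)
          = if cur + v > g then (i0 + 1, cur + v, cur + v) else (k, g, cur + v) from rfl]
    rw [show pref cur (v :: t) = (cur + v) :: pref (cur + v) t from rfl]
    rw [show aux (i0 + 1) k g ((cur + v) :: pref (cur + v) t)
          = if cur + v > g then aux (i0 + 1 + 1) (i0 + 1) (cur + v) (pref (cur + v) t)
            else aux (i0 + 1 + 1) k g (pref (cur + v) t) from rfl]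
    by_cases h : cur + v > g
    · rw [if_pos h, if_pos h, ih (i0 + 1) (i0 + 1) (cur + v) (cur + v)]
      simp [add_assoc]
    · rw [if_neg h, if_neg h, ih (i0 + 1) k g (cur + v)]
      simp [add_assoc]

theorem lemB (t : List Int) (acc : List Int) (s : Int) :
    t.foldl stepB (acc, s) = (acc ++ pref s t, s + t.sum) := by
  induction t generalizing acc s with
  | nil => simp [pref]
  | cons v t ih =>
    rw [List.foldl_cons, show stepB (acc, s) v = (acc ++ [s + v], s + v) from rfl, ih]
    rw [show pref s (v :: t) = (s + v) :: pref (s + v) t from rfl]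
    simp [add_assoc]

theorem lemKey (t : List Int) (g i k : Int) :
    aux i k g t = (if g < t.foldl max g then i + fidx t (t.foldl max g) else k, t.foldl max g) := by
  induction t generalizing g i k with
  | nil => simp [aux]
  | cons v t ih =>
    simp only [aux, List.foldl_cons]
    by_cases hvg : v > g
    · rw [if_pos hvg, ih]
      have hgv : max g v = v := by omega
      rw [hgv]
      have hvM : v ≤ t.foldl max v := (PySem.List.le_foldl_max t v).1
      have hgM : g < t.foldl max v := lt_of_lt_of_le hvg hvM
      rw [if_pos hgM]
      by_cases hv : v = t.foldl max v
      · have hnlt : ¬ v < t.foldl max v := by omega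
        rw [if_neg hnlt]
        rw [show fidx (v :: t) (t.foldl max v) = 0 by
          rw [fidx, ← hv, PySem.List.index?_cons_self]; rfl]
        simp
      · have hlt : v < t.foldl max v := lt_of_le_of_ne hvM hv
        rw [if_pos hlt]
        have hmem : t.foldl max v ∈ t := by
          rcases PySem.List.foldl_max_mem t v with h | h
          · exact absurd h.symm hv
          · exact h
        obtain ⟨j, hj⟩ := Option.isSome_iff_exists.mp
          ((PySem.List.index?_isSome_iff t (t.foldl max v)).mpr hmem)
        rw [show fidx (v :: t) (t.foldl max v) = fidx t (t.foldl max v) + 1 by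
          rw [fidx, fidx, PySem.List.index?_cons_of_ne t hv, hj]
          simp]
        ring_nf
    · rw [if_neg hvg, ih]
      have hgv : max g v = g := by omega
      rw [hgv]
      by_cases hg : g < t.foldl max g
      · rw [if_pos hg, if_pos hg]
        have hne : v ≠ t.foldl max g := by omega
        have hmem : t.foldl max g ∈ t := by
          rcases PySem.List.foldl_max_mem t g with h | h
          · omega
          · exact h
        obtain ⟨j, hj⟩ := Option.isSome_iff_exists.mp
          ((PySem.List.index?_isSome_iff t (t.foldl max g)).mpr hmem)
        rw [show fidx (v :: t) (t.foldl max g) = fidx t (t.foldl max g) + 1 by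
          rw [fidx, fidx, PySem.List.index?_cons_of_ne t hne, hj]
          simp]
        ring_nf
      · rw [if_neg hg, if_neg hg]

-- ===== VERDICT (by name: the statement is the Claim_ definition above) =====
theorem find_g_max_spec : Claim_equal_find_g_max := by
  intro gv _ hpre
  unfold Spec_find_g_max
  match gv with
  | [] => exact absurd rfl hpre
  | g0 :: rest =>
    have hA : find_g_max (g0 :: rest) = aux 1 0 g0 (pref g0 rest) := by
      show (((PySem.List.enumerate rest).foldl stepA (0, g0, g0)).1,
            ((PySem.List.enumerate rest).foldl stepA (0, g0, g0)).2.1)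
          = aux 1 0 g0 (pref g0 rest)
      rw [lemA rest 0 0 g0 g0]
      norm_num
    set P := pref g0 rest with hP
    set M := P.foldl max g0 with hM
    have hB : find_g_max_alt (g0 :: rest)
        = (if g0 = M then (0, M) else (1 + fidx P M, M)) := by
      show (match PySem.List.max? ((g0 :: rest).foldl stepB ([], 0)).1 (fun y => y) with
            | none => ((0 : Int), (0 : Int))
            | some g_max =>
              match PySem.List.index? ((g0 :: rest).foldl stepB ([], 0)).1 g_max with
              | none => (0, 0)
              | some k => ((k : Int), g_max)) = _
      rw [lemB (g0 :: rest) [] 0]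
      rw [show ([] ++ pref 0 (g0 :: rest), 0 + (g0 :: rest).sum).1 = g0 :: P by
        simp [pref, hP]]
      rw [PySem.List.max?_id_cons, ← hM]
      show (match PySem.List.index? (g0 :: P) M with
            | none => ((0 : Int), (0 : Int))
            | some k => ((k : Int), M))
          = if g0 = M then (0, M) else (1 + fidx P M, M)
      by_cases h0 : g0 = M
      · rw [if_pos h0]
        rw [show PySem.List.index? (g0 :: P) M = some 0 by
          conv_lhs => rw [show M = g0 from h0.symm]
          exact PySem.List.index?_cons_self g0 P]
        rfl
      · rw [if_neg h0]
        have hmem : M ∈ P := by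
          rcases PySem.List.foldl_max_mem P g0 with h | h
          · exact absurd h.symm h0
          · exact h
        obtain ⟨j, hj⟩ := Option.isSome_iff_exists.mp
          ((PySem.List.index?_isSome_iff P M).mpr hmem)
        rw [show PySem.List.index? (g0 :: P) M = some (j + 1) by
          rw [PySem.List.index?_cons_of_ne P h0, hj]; rfl]
        rw [show fidx P M = (j : Int) by rw [fidx, hj]; rfl]
        show ((((j : Nat) + 1 : Nat) : Int), M) = (1 + (j : Int), M)
        push_cast
        rw [add_comm]
    rw [hA, hB, lemKey]
    have hg0M : g0 ≤ M := (PySem.List.le_foldl_max P g0).1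
    by_cases h0 : g0 = M
    · rw [← hM, if_neg (by omega : ¬ g0 < M), if_pos h0]
    · rw [← hM, if_pos (by omega : g0 < M), if_neg h0]
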